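-- pv_equiv track=rewrite | github.com/jeongyeob97/pythonAlgorithm | 스킬테스트/2-11.py | solution
-- ===== SOURCE A (Python) =====
-- from math import ceil
--
-- def solution(progresses, speeds):
--     answer = []
--     index = 0
--     while index < len(progresses):
--         cnt = cal(progresses, speeds, index)
--         answer.append(cnt)
--         index += cnt
--     return answer
--
-- def cal(progresses, speeds, index):
--     rest = 100-progresses[index]
--     days = ceil(rest/speeds[index])
--
--     for i in range(index,len(progresses)):
--         progresses[i] += (speeds[i] * days)
--
--     cnt = 0
--     for i in range(index,len(progresses)):
--         if progresses[i] < 100: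
--             break
--         cnt += 1
--     return cnt
-- ===== SOURCE B (Python) =====
-- def solution(progresses, speeds):
--     answer = []
--     maxd = None
--     for p, s in zip(progresses, speeds):
--         d = -((p - 100) // s)  # days this task needs: ceil((100-p)/s)
--         if maxd is None or d > maxd:
--             answer.append(1)
--             maxd = d
--         else:
--             answer[-1] += 1
--     return answer
-- ===== Notes on version B (the rewrite author's own statement) =====
-- stated objective: faster
-- what changed: A repeatedly mutates the whole remaining suffix of progresses and rescans it for each release; B precomputes each task's completion day with one exact integer ceiling division and emits the group sizes in a single pass that keeps only a running maximum day.
-- outside the precondition, e.g. on solution([1378619066, 91, 98], [3, 1025451823, 5]): A returns [1, 0, 2], B returns [1, 2]; on solution([95], [-5]): A returns [1], B returns [1]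
import Mathlib
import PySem

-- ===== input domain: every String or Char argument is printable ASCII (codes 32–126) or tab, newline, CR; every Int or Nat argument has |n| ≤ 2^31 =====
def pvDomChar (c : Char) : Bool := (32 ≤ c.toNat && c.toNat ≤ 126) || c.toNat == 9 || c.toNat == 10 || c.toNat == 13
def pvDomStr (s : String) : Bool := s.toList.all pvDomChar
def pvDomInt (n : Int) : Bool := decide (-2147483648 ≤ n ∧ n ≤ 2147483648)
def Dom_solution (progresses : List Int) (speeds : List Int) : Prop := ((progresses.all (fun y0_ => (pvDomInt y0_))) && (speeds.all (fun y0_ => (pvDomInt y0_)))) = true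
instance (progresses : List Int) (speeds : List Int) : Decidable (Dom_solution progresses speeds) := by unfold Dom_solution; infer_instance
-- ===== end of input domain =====

-- B replaces A's per-release whole-suffix mutation and rescan by a single pass over precomputed
-- per-task completion days grouped under a running maximum. A mutates `progresses` in place and
-- B does not: the equivalence proved is about the RETURN value only.

-- ===== PORT A =====
-- one round of A's `cal`, returning (cnt, updated progresses): `progresses[index]` and
-- `speeds[index]` are in range under Pre_ (Python raises IndexError outside), so `getD _ 0` is
-- exact there; on Dom ∩ Pre_ every intermediate value stays far below 2^53, where CPython's
-- `ceil(rest/speeds[index])` equals the exact integer ceiling -((-rest) // s), ported as such;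
-- the break-terminated counting loop is the length of the matching prefix it scans
def calA (prog : List Int) (speeds : List Int) (index : Nat) : Nat × List Int :=
  let rest : Int := 100 - prog.getD index 0
  let days : Int := -(PySem.Int.floordiv (-rest) (speeds.getD index 0))
  let prog' := prog.mapIdx (fun i p => if index ≤ i then p + speeds.getD i 0 * days else p)
  (((prog'.drop index).takeWhile (fun p => !(p < 100))).length, prog')

-- A's while-loop; under Pre_ every round has cnt ≥ 1, so fuel `len+1` is never exhausted there
def loopA (speeds : List Int) : Nat → List Int → Nat → List Int → List Int
  | 0, _, _, answer => answer
  | fuel + 1, prog, index, answer =>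
    if index < prog.length then
      loopA speeds fuel (calA prog speeds index).2 (index + (calA prog speeds index).1)
        (answer ++ [((calA prog speeds index).1 : Int)])
    else answer

def solution (progresses : List Int) (speeds : List Int) : List Int :=
  loopA speeds (progresses.length + 1) progresses 0 []

-- ===== PORT B =====
-- Source B's `-((p - 100) // s)`: the number of days task (p, s) needs
def dayOf (p s : Int) : Int := -(PySem.Int.floordiv (p - 100) s)

-- Source B's loop body; the answer list is kept reversed so that Python's `answer.append(1)` /
-- `answer[-1] += 1` become cons / head-increment (exact; the [] match arm is unreachable)
def stepB (st : List Int × Option Int) (d : Int) : List Int × Option Int :=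
  match st with
  | (revAns, none) => (1 :: revAns, some d)
  | (revAns, some m) =>
    if d > m then (1 :: revAns, some d)
    else ((match revAns with | [] => [] | c :: t => (c + 1) :: t), some m)

def solution_alt (progresses : List Int) (speeds : List Int) : List Int :=
  (((progresses.zip speeds).map (fun ps => dayOf ps.1 ps.2)).foldl stepB ([], none)).1.reverse

-- ===== PRECONDITION & SPEC =====
-- Pre_ is the task's natural domain (a progress is a percentage ≤ 100, a deployment speed is
-- positive, one speed per task). It excludes: speeds shorter than progresses (A raises IndexError)
-- and non-positive used speeds (A raises ZeroDivisionError or loops forever; on the rare negative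
-- speed dividing rest evenly A still returns — see cites). It also excludes progresses > 100, on
-- which A still returns: there A's intermediate values can exceed 2^53 and math.ceil of the float
-- quotient is silently inexact (see cites), so no exact port of A exists for them.
def Pre_solution (progresses : List Int) (speeds : List Int) : Prop :=
  progresses.length ≤ speeds.length ∧
  (∀ i ∈ List.range progresses.length, 0 < speeds.getD i 0) ∧
  (∀ p ∈ progresses, p ≤ 100)
instance (progresses : List Int) (speeds : List Int) : Decidable (Pre_solution progresses speeds) := by
  unfold Pre_solution; infer_instance

def pvWitness_solution : List Int × List Int := ([93, 30, 55, 60], [1, 30, 5, 10])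

def Spec_solution (progresses : List Int) (speeds : List Int) (out : List Int) : Prop := out = solution_alt progresses speeds
instance (progresses : List Int) (speeds : List Int) (out : List Int) : Decidable (Spec_solution progresses speeds out) := by unfold Spec_solution; infer_instance

-- ===== CLAIM (what is proved, stated in full; the proofs are below) =====
def Claim_equal_solution : Prop := ∀ (progresses : List Int) (speeds : List Int), Dom_solution progresses speeds → Pre_solution progresses speeds → Spec_solution progresses speeds (solution progresses speeds)

-- ===== LEMMAS AND PROOFS =====

-- reference value: the per-task completion days of the ORIGINAL input
def daysL (progresses speeds : List Int) : List Int :=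
  (progresses.zip speeds).map (fun ps => dayOf ps.1 ps.2)

-- reference grouping: a leader needing d days takes along every following task needing ≤ d days
def grp : List Int → List Int
  | [] => []
  | d :: rest =>
    ((1 + (rest.takeWhile (fun x => x ≤ d)).length : Nat) : Int) ::
      grp (rest.dropWhile (fun x => x ≤ d))
termination_by l => l.length
decreasing_by
  simp only [List.length_cons]
  exact Nat.lt_succ_of_le (List.length_dropWhile_le _ _)

lemma grp_nil : grp [] = [] := by simp [grp]

lemma grp_cons (d : Int) (rest : List Int) :
    grp (d :: rest) = ((1 + (rest.takeWhile (fun x => x ≤ d)).length : Nat) : Int) ::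
      grp (rest.dropWhile (fun x => x ≤ d)) := by
  rw [grp]

lemma ceil_shift (a s D : Int) (hs : 0 < s) :
    -(PySem.Int.floordiv (a + s * D - 100) s) = -(PySem.Int.floordiv (a - 100) s) - D := by
  rw [PySem.Int.floordiv_eq_ediv_of_pos hs, PySem.Int.floordiv_eq_ediv_of_pos hs,
      show a + s * D - 100 = (a - 100) + D * s by ring,
      Int.add_mul_ediv_right _ _ (by omega : s ≠ 0)]
  ring

lemma dayOf_le_iff (p s dy : Int) (hs : 0 < s) : (dayOf p s ≤ dy) ↔ ¬ (p + s * dy < 100) := by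
  unfold dayOf
  have h := PySem.Int.le_floordiv_iff_mul_le (q := -dy) (a := p - 100) (b := s) hs
  constructor
  · intro h1
    have h2 : -dy * s ≤ p - 100 := h.mp (by omega)
    nlinarith
  · intro h1
    have h2 : -dy * s ≤ p - 100 := by nlinarith
    have h3 := h.mpr h2
    omega

lemma takeWhile_len_congr {α β : Type} (P : α → Bool) (Q : β → Bool) :
    ∀ (xs : List α) (ys : List β), xs.length = ys.length →
      (∀ i (h1 : i < xs.length) (h2 : i < ys.length), P xs[i] = Q ys[i]) →
      (xs.takeWhile P).length = (ys.takeWhile Q).length := by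
  intro xs
  induction xs with
  | nil =>
    intro ys hl _
    cases ys with
    | nil => rfl
    | cons y ys => simp at hl
  | cons x xs ih =>
    intro ys hl hpt
    cases ys with
    | nil => simp at hl
    | cons y ys =>
      have h0 : P x = Q y := hpt 0 (by simp) (by simp)
      by_cases hp : P x = true
      · rw [List.takeWhile_cons_of_pos hp, List.takeWhile_cons_of_pos (h0 ▸ hp)]
        simp only [List.length_cons]
        exact congrArg Nat.succ (ih ys (by simpa using hl)
          (fun i hi1 hi2 => hpt (i + 1) (by simpa using hi1) (by simpa using hi2)))
      · rw [List.takeWhile_cons_of_neg (by simpa using hp),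
            List.takeWhile_cons_of_neg (by rw [← h0]; simpa using hp)]
        rfl

lemma dropWhile_eq_drop {α : Type} (p : α → Bool) (xs : List α) :
    xs.dropWhile p = xs.drop (xs.takeWhile p).length := by
  induction xs with
  | nil => rfl
  | cons x xs ih =>
    by_cases hp : p x = true
    · rw [List.dropWhile_cons_of_pos hp, List.takeWhile_cons_of_pos hp]; simpa using ih
    · rw [List.dropWhile_cons_of_neg (by simpa using hp),
          List.takeWhile_cons_of_neg (by simpa using hp)]
      rfl

lemma daysL_length (orig speeds : List Int) (hlen : orig.length ≤ speeds.length) :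
    (daysL orig speeds).length = orig.length := by
  simp [daysL, hlen]

lemma daysL_getElem (orig speeds : List Int) (i : Nat) (hi : i < orig.length)
    (hlen : orig.length ≤ speeds.length)
    (h : i < (daysL orig speeds).length) :
    (daysL orig speeds)[i] = dayOf (orig[i]'hi) (speeds[i]'(lt_of_lt_of_le hi hlen)) := by
  simp [daysL, List.getElem_zip]

lemma calA_snd_length (prog speeds : List Int) (index : Nat) :
    (calA prog speeds index).2.length = prog.length := by
  simp [calA]

lemma calA_snd_getElem (prog speeds : List Int) (index i : Nat)
    (hip : i < prog.length) (his : i < speeds.length)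
    (hxp : index < prog.length) (hxs : index < speeds.length) :
    (calA prog speeds index).2[i]'(by simpa [calA] using hip) =
      if index ≤ i then
        prog[i] + speeds[i] *
          (-(PySem.Int.floordiv (-(100 - prog[index])) (speeds[index])))
      else prog[i] := by
  simp [calA, List.getElem_mapIdx, List.getD, his, hxp, hxs]

lemma calA_fst (prog speeds : List Int) (index : Nat) :
    (calA prog speeds index).1 =
      (((calA prog speeds index).2.drop index).takeWhile (fun p => !(p < 100))).length := rfl

lemma loopA_eq (orig speeds : List Int) (hlen : orig.length ≤ speeds.length)
    (hpos : ∀ (i : Nat) (h : i < orig.length), 0 < speeds[i]'(lt_of_lt_of_le h hlen)) :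
    ∀ (fuel index : Nat) (D : Int) (prog answer : List Int) (hpl : prog.length = orig.length),
      (∀ (i : Nat) (h1 : index ≤ i) (h2 : i < orig.length),
        prog[i]'(by omega) = orig[i]'h2 + speeds[i]'(by omega) * D) →
      orig.length - index ≤ fuel →
      loopA speeds fuel prog index answer = answer ++ grp ((daysL orig speeds).drop index) := by
  intro fuel
  induction fuel with
  | zero =>
    intro index D prog answer hpl hinv hfuel
    have hge : (daysL orig speeds).length ≤ index := by
      rw [daysL_length orig speeds hlen]; omega
    rw [List.drop_eq_nil_of_le hge, grp_nil]
    simp [loopA]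
  | succ fuel ih =>
    intro index D prog answer hpl hinv hfuel
    by_cases hidx : index < prog.length
    · have hin : index < orig.length := by omega
      have hxs : index < speeds.length := by omega
      have hdll : (daysL orig speeds).length = orig.length := daysL_length orig speeds hlen
      have hs : 0 < speeds[index]'hxs := hpos index hin
      have hdays : -(PySem.Int.floordiv (-(100 - prog[index]'hidx)) (speeds[index]'hxs)) =
          dayOf (orig[index]'hin) (speeds[index]'hxs) - D := by
        rw [show -(100 - prog[index]'hidx) =
              orig[index]'hin + speeds[index]'hxs * D - 100 by
            rw [hinv index le_rfl hin]; ring]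
        rw [ceil_shift _ _ _ hs]
        rfl
      have hval : ∀ (i : Nat), index ≤ i → ∀ (h2 : i < orig.length)
          (hb : i < (calA prog speeds index).2.length),
          (calA prog speeds index).2[i] =
            orig[i]'h2 + speeds[i]'(by omega) *
              dayOf (orig[index]'hin) (speeds[index]'hxs) := by
        intro i h1 h2 hb
        rw [calA_snd_getElem prog speeds index i (by omega) (by omega) hidx hxs,
            if_pos h1, hdays, hinv i h1 h2]
        ring
      have hdrop : (daysL orig speeds).drop index =
          dayOf (orig[index]'hin) (speeds[index]'hxs) :: (daysL orig speeds).drop (index + 1) := by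
        have h := (List.getElem_cons_drop (show index < (daysL orig speeds).length by omega)).symm
        rw [h, daysL_getElem orig speeds index hin hlen]
      have hcong : (((calA prog speeds index).2.drop index).takeWhile (fun p => !(p < 100))).length =
          (((daysL orig speeds).drop index).takeWhile
            (fun x => x ≤ dayOf (orig[index]'hin) (speeds[index]'hxs))).length := by
        apply takeWhile_len_congr
        · simp [calA_snd_length, hpl, hdll]
        · intro j hj1 hj2
          have hb1 : index + j < (calA prog speeds index).2.length := by
            rw [List.length_drop, calA_snd_length] at hj1
            rw [calA_snd_length]
            omega
          have hin2 : index + j < orig.length := by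
            rw [calA_snd_length, hpl] at hb1; exact hb1
          rw [List.getElem_drop, List.getElem_drop]
          rw [hval (index + j) (by omega) hin2 hb1]
          rw [daysL_getElem orig speeds (index + j) hin2 hlen (by omega)]
          rw [← decide_not]
          exact decide_eq_decide.mpr
            (dayOf_le_iff (orig[index + j]'hin2) (speeds[index + j]'(by omega))
              (dayOf (orig[index]'hin) (speeds[index]'hxs)) (hpos _ hin2)).symm
      have hcnt : (calA prog speeds index).1 =
          1 + (((daysL orig speeds).drop (index + 1)).takeWhile
            (fun x => x ≤ dayOf (orig[index]'hin) (speeds[index]'hxs))).length := by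
        rw [calA_fst, hcong, hdrop,
            List.takeWhile_cons_of_pos (by simp)]
        simp [Nat.add_comm]
      have hgrp : grp ((daysL orig speeds).drop index) =
          ((1 + (((daysL orig speeds).drop (index + 1)).takeWhile
              (fun x => x ≤ dayOf (orig[index]'hin) (speeds[index]'hxs))).length : Nat) : Int) ::
            grp ((daysL orig speeds).drop (index + (calA prog speeds index).1)) := by
        rw [hdrop, grp_cons]
        congr 2
        rw [dropWhile_eq_drop, List.drop_drop]
        congr 1
        rw [hcnt]
        omega
      rw [loopA, if_pos hidx]
      rw [ih (index + (calA prog speeds index).1)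
            (dayOf (orig[index]'hin) (speeds[index]'hxs))
            (calA prog speeds index).2
            (answer ++ [((calA prog speeds index).1 : Int)])
            (by rw [calA_snd_length, hpl])
            (by
              intro i h1 h2
              exact hval i (by omega) h2 (by rw [calA_snd_length]; omega))
            (by rw [hcnt]; omega)]
      rw [hgrp, hcnt]
      simp
    · rw [loopA, if_neg hidx]
      have hge : (daysL orig speeds).length ≤ index := by
        rw [daysL_length orig speeds hlen]; omega
      rw [List.drop_eq_nil_of_le hge, grp_nil]
      simp

lemma foldB_eq : ∀ (ds : List Int) (revAns : List Int) (c m : Int),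
    ((ds.foldl stepB (c :: revAns, some m)).1).reverse =
      revAns.reverse ++
        (c + ((ds.takeWhile (fun x => x ≤ m)).length : Int)) ::
          grp (ds.dropWhile (fun x => x ≤ m)) := by
  intro ds
  induction ds with
  | nil =>
    intro revAns c m
    simp [grp_nil]
  | cons d ds ih =>
    intro revAns c m
    by_cases h : d > m
    · rw [List.foldl_cons, show stepB (c :: revAns, some m) d = (1 :: c :: revAns, some d) by
        simp [stepB, h]]
      rw [ih (c :: revAns) 1 d]
      rw [List.takeWhile_cons_of_neg (by simp; omega),
          List.dropWhile_cons_of_neg (by simp; omega), grp_cons]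
      push_cast
      simp [List.append_assoc]
    · have hle : d ≤ m := by omega
      rw [List.foldl_cons, show stepB (c :: revAns, some m) d = ((c + 1) :: revAns, some m) by
        simp [stepB, h]]
      rw [ih revAns (c + 1) m]
      rw [List.takeWhile_cons_of_pos (by simp [hle]),
          List.dropWhile_cons_of_pos (by simp [hle])]
      simp only [List.length_cons]
      push_cast
      ring_nf

lemma alt_eq_grp (progresses speeds : List Int) :
    solution_alt progresses speeds = grp (daysL progresses speeds) := by
  unfold solution_alt
  rw [show (progresses.zip speeds).map (fun ps => dayOf ps.1 ps.2) = daysL progresses speeds from rfl]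
  cases hds : daysL progresses speeds with
  | nil => simp [grp_nil]
  | cons d ds =>
    rw [List.foldl_cons, show stepB (([] : List Int), none) d = ([1], some d) from rfl]
    rw [show ([1] : List Int) = 1 :: [] from rfl, foldB_eq ds [] 1 d, grp_cons]
    push_cast
    simp

-- ===== VERDICT (by name: the statement is the Claim_ definition above) =====
theorem solution_spec : Claim_equal_solution := by
  intro progresses speeds _hdom hpre
  obtain ⟨hlen, hposR, _hle100⟩ := hpre
  unfold Spec_solution
  have hpos : ∀ (i : Nat) (h : i < progresses.length),
      0 < speeds[i]'(lt_of_lt_of_le h hlen) := by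
    intro i hi
    have h0 := hposR i (List.mem_range.mpr hi)
    rwa [List.getD_eq_getElem speeds 0 (lt_of_lt_of_le hi hlen)] at h0
  rw [alt_eq_grp]
  unfold solution
  rw [loopA_eq progresses speeds hlen hpos (progresses.length + 1) 0 0 progresses [] rfl
      (by intro i h1 h2; ring) (by omega)]
  simp
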